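-- pv_equiv track=rewrite | github.com/xph9876/RNA-mediated_DSB_repair | flipped_intron/flipped_intron_antisense_F.py | search_seq
-- ===== SOURCE A (Python) =====
-- def search_seq(fastq, flipped_antisense_seq, flipped_5splicing_seq):
-- 	flipped_antisense = 0
-- 	flipped_5splicing = 0
-- 	wo_intron = 0
-- 	isseq = False
-- 	total_count = 0
-- 	for l in fastq:
-- 		if l == '\n':
-- 			continue
-- 		if l[0]== '@':
-- 			isseq = True
-- 		elif isseq:
-- 			seq = l.rstrip('\n')
-- 			if seq.find(flipped_antisense_seq) != int(-1):
-- 				flipped_antisense += 1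
-- 			elif seq.find(flipped_5splicing_seq) != int(-1):
-- 				flipped_5splicing += 1
-- 			else:
-- 				pass
-- 			total_count += 1
-- 			isseq = False
-- 	return flipped_antisense, flipped_5splicing, total_count
-- ===== SOURCE B (Python) =====
-- def search_seq(fastq, flipped_antisense_seq, flipped_5splicing_seq):
--     # Phase 1: run the FASTQ state machine only to collect the sequence lines.
--     seqs = []
--     isseq = False
--     for l in fastq:
--         if l == '\n':
--             continue
--         if l[0] == '@':
--             isseq = True
--         elif isseq:
--             seqs.append(l.rstrip('\n'))
--             isseq = False
--     # Phase 2: count with separate passes over the collected sequences.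
--     flipped_antisense = sum(1 for s in seqs if flipped_antisense_seq in s)
--     flipped_5splicing = sum(1 for s in seqs
--                             if flipped_antisense_seq not in s and flipped_5splicing_seq in s)
--     return flipped_antisense, flipped_5splicing, len(seqs)
-- ===== Notes on version B (the rewrite author's own statement) =====
-- stated objective: alternative
-- what changed: B separates parsing from counting: one state-machine pass collects the sequence lines into a list, then the three results are computed by independent counting passes ('in' membership instead of find() != -1), instead of A's single pass mutating three counters.
import Mathlib
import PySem

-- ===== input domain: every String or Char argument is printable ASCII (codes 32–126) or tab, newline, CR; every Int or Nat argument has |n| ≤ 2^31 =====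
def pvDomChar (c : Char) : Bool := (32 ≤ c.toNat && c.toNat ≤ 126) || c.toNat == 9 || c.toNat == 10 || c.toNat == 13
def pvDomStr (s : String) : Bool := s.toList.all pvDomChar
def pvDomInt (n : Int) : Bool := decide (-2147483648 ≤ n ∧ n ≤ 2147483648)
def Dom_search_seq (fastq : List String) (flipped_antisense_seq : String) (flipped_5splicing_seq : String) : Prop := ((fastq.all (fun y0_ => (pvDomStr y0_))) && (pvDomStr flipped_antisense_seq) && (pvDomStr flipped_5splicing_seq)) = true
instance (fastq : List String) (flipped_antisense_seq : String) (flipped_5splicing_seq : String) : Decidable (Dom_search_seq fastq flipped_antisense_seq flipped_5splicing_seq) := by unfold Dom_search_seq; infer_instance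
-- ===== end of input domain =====

-- B separates parsing (collect sequence lines) from counting (independent countP passes); alternative decomposition, same cost.


-- ===== PORT A =====
-- exact hand port of Python's s.rstrip('\n'): drop trailing newline characters
def rstripNl (s : String) : String :=
  String.ofList ((s.toList.reverse.dropWhile (fun c => c == '\n')).reverse)

-- one loop iteration of A: state = (flipped_antisense, flipped_5splicing, isseq, total_count)
def stepA (a5 f5 : String) (st : Int × Int × Bool × Int) (l : String) : Int × Int × Bool × Int :=
  let (fa, fc, isseq, total) := st
  if l = "\n" then st
  else if PySem.Str.pyGet? l 0 = some '@' then (fa, fc, true, total)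
  else if isseq then
    let seq := rstripNl l
    if PySem.Str.find seq a5 ≠ (-1 : Int) then (fa + 1, fc, false, total + 1)
    else if PySem.Str.find seq f5 ≠ (-1 : Int) then (fa, fc + 1, false, total + 1)
    else (fa, fc, false, total + 1)
  else st

def search_seq (fastq : List String) (flipped_antisense_seq : String) (flipped_5splicing_seq : String) : Int × Int × Int :=
  let st := fastq.foldl (stepA flipped_antisense_seq flipped_5splicing_seq) (0, 0, false, 0)
  (st.1, st.2.1, st.2.2.2)

-- ===== PORT B =====
-- phase 1 of B: the same state machine, but only collecting the sequence lines
def collectSeqs : List String → Bool → List String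
  | [], _ => []
  | l :: rest, isseq =>
    if l = "\n" then collectSeqs rest isseq
    else if PySem.Str.pyGet? l 0 = some '@' then collectSeqs rest true
    else if isseq then rstripNl l :: collectSeqs rest false
    else collectSeqs rest isseq

def search_seq_alt (fastq : List String) (flipped_antisense_seq : String) (flipped_5splicing_seq : String) : Int × Int × Int :=
  let seqs := collectSeqs fastq false
  ((seqs.countP (fun s => PySem.Str.isIn flipped_antisense_seq s) : Int),
   (seqs.countP (fun s => !PySem.Str.isIn flipped_antisense_seq s && PySem.Str.isIn flipped_5splicing_seq s) : Int),
   (seqs.length : Int))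

-- ===== PRECONDITION & SPEC =====
-- Pre_ excludes lists containing the empty string, on which Python's l[0] raises IndexError.
def Pre_search_seq (fastq : List String) (flipped_antisense_seq : String) (flipped_5splicing_seq : String) : Prop :=
  "" ∉ fastq
instance (fastq : List String) (flipped_antisense_seq : String) (flipped_5splicing_seq : String) : Decidable (Pre_search_seq fastq flipped_antisense_seq flipped_5splicing_seq) := by unfold Pre_search_seq; infer_instance

def pvWitness_search_seq : List String × String × String := (["@r1", "ACGT\n"], "CG", "GT")

def Spec_search_seq (fastq : List String) (flipped_antisense_seq : String) (flipped_5splicing_seq : String) (out : Int × Int × Int) : Prop := out = search_seq_alt fastq flipped_antisense_seq flipped_5splicing_seq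
instance (fastq : List String) (flipped_antisense_seq : String) (flipped_5splicing_seq : String) (out : Int × Int × Int) : Decidable (Spec_search_seq fastq flipped_antisense_seq flipped_5splicing_seq out) := by unfold Spec_search_seq; infer_instance

-- ===== CLAIM (what is proved, stated in full; the proofs are below) =====
def Claim_equal_search_seq : Prop := ∀ (fastq : List String) (flipped_antisense_seq : String) (flipped_5splicing_seq : String), Dom_search_seq fastq flipped_antisense_seq flipped_5splicing_seq → Pre_search_seq fastq flipped_antisense_seq flipped_5splicing_seq → Spec_search_seq fastq flipped_antisense_seq flipped_5splicing_seq (search_seq fastq flipped_antisense_seq flipped_5splicing_seq)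

-- ===== LEMMAS AND PROOFS =====

-- the isseq flag after processing a list (mirrors the recursion; proof-side helper)
def flagAfter : List String → Bool → Bool
  | [], b => b
  | l :: rest, isseq =>
    if l = "\n" then flagAfter rest isseq
    else if PySem.Str.pyGet? l 0 = some '@' then flagAfter rest true
    else if isseq then flagAfter rest false
    else flagAfter rest isseq

lemma charsFind_neg_iff (s sub : List Char) :
    PySem.Chars.find s sub = (-1 : Int) ↔ PySem.Chars.isIn sub s = false := by
  rw [PySem.Chars.find_eq_neg_one_iff, PySem.Chars.isIn_eq_false_iff]

lemma loop_eq (a5 f5 : String) (fastq : List String) :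
    ∀ (isseq : Bool) (fa fc total : Int),
      fastq.foldl (stepA a5 f5) (fa, fc, isseq, total) =
        (fa + ((collectSeqs fastq isseq).countP (fun s => PySem.Str.isIn a5 s) : Int),
         fc + ((collectSeqs fastq isseq).countP (fun s => !PySem.Str.isIn a5 s && PySem.Str.isIn f5 s) : Int),
         flagAfter fastq isseq,
         total + ((collectSeqs fastq isseq).length : Int)) := by
  induction fastq with
  | nil => intro isseq fa fc total; simp [collectSeqs, flagAfter]
  | cons l rest ih =>
    intro isseq fa fc total
    by_cases h1 : l = "\n"
    · simp [List.foldl_cons, stepA, collectSeqs, flagAfter, h1, ih]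
    · by_cases h2 : PySem.List.pyGet? l.toList 0 = some '@'
      · simp [List.foldl_cons, stepA, collectSeqs, flagAfter, h1, h2, ih]
      · cases isseq with
        | false => simp [List.foldl_cons, stepA, collectSeqs, flagAfter, h1, h2, ih]
        | true =>
          by_cases hA : PySem.Chars.find (rstripNl l).toList a5.toList = (-1 : Int)
          · have hIA : PySem.Chars.isIn a5.toList (rstripNl l).toList = false :=
              (charsFind_neg_iff _ _).mp hA
            by_cases hF : PySem.Chars.find (rstripNl l).toList f5.toList = (-1 : Int)
            · have hIF : PySem.Chars.isIn f5.toList (rstripNl l).toList = false :=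
                (charsFind_neg_iff _ _).mp hF
              simp [List.foldl_cons, stepA, collectSeqs, flagAfter, h1, h2, hA, hF, hIA, hIF, ih]
              omega
            · have hIF : PySem.Chars.isIn f5.toList (rstripNl l).toList = true := by
                cases h : PySem.Chars.isIn f5.toList (rstripNl l).toList
                · exact absurd ((charsFind_neg_iff _ _).mpr h) hF
                · rfl
              simp [List.foldl_cons, stepA, collectSeqs, flagAfter, h1, h2, hA, hF, hIA, hIF, ih]
              omega
          · have hIA : PySem.Chars.isIn a5.toList (rstripNl l).toList = true := by
              cases h : PySem.Chars.isIn a5.toList (rstripNl l).toList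
              · exact absurd ((charsFind_neg_iff _ _).mpr h) hA
              · rfl
            simp [List.foldl_cons, stepA, collectSeqs, flagAfter, h1, h2, hA, hIA, ih]
            omega

-- ===== VERDICT (by name: the statement is the Claim_ definition above) =====
theorem search_seq_spec : Claim_equal_search_seq := by
  intro fastq a5 f5 _ _
  unfold Spec_search_seq search_seq search_seq_alt
  simp [loop_eq]
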